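-- pv_equiv track=rewrite | github.com/fpvnicolas-byte/safetasks-v3 | backend/app/modules/scheduling/services.py | _generate_conflict_recommendations
-- ===== SOURCE A (Python) =====
-- from typing import List, Optional, Dict, Any, Tuple
-- from collections import defaultdict
--
-- def _generate_conflict_recommendations(conflicts: List[Dict[str, Any]]) -> List[str]:
--     """Generate recommendations for resolving conflicts."""
--     recommendations = []
--
--     # Group conflicts by type
--     conflict_types = defaultdict(list)
--     for conflict in conflicts:
--         conflict_types[conflict['type']].append(conflict)
--
--     if conflict_types.get('crew_conflict'):
--         recommendations.append("Consider staggering crew assignments or adding contingency crew members")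
--
--     if conflict_types.get('equipment_conflict'):
--         recommendations.append("Review equipment availability and consider backup equipment options")
--
--     if conflict_types.get('location_conflict'):
--         recommendations.append("Adjust event timing to avoid location overlaps or use alternative locations")
--
--     if len(conflicts) > 5:
--         recommendations.append("Consider extending the shooting day or splitting scenes across multiple days")
--
--     return recommendations
-- ===== SOURCE B (Python) =====
-- def _generate_conflict_recommendations(conflicts):
--     """Generate recommendations for resolving conflicts."""
--     recommendations = []
--
--     if any(c['type'] == 'crew_conflict' for c in conflicts):
--         recommendations.append("Consider staggering crew assignments or adding contingency crew members")
--
--     if any(c['type'] == 'equipment_conflict' for c in conflicts):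
--         recommendations.append("Review equipment availability and consider backup equipment options")
--
--     if any(c['type'] == 'location_conflict' for c in conflicts):
--         recommendations.append("Adjust event timing to avoid location overlaps or use alternative locations")
--
--     if len(conflicts) > 5:
--         recommendations.append("Consider extending the shooting day or splitting scenes across multiple days")
--
--     return recommendations
-- ===== Notes on version B (the rewrite author's own statement) =====
-- stated objective: simpler
-- what changed: Drops the defaultdict grouping pass entirely and instead tests each of the three recognized conflict types with a direct short-circuiting any() scan over the original list.
import Mathlib
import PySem

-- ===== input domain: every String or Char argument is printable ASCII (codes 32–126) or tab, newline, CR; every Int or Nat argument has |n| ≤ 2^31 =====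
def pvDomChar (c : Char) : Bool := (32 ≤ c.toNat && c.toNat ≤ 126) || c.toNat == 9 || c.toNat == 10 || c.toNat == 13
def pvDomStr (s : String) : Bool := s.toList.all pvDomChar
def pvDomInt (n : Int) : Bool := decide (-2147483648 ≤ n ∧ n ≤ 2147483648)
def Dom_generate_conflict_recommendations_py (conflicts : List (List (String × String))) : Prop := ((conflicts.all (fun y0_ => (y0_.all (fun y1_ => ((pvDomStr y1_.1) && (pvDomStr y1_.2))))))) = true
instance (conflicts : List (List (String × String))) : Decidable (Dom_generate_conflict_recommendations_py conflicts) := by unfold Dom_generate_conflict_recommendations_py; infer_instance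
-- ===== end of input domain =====

-- B replaces A's defaultdict grouping pass with three direct any() scans; same O(n) cost, simpler.
-- Pre_ excludes inputs where some conflict dict has no "type" key, on which A raises KeyError.


-- shared primitive: Python's c['type'] on an association-list dict (first match; none = KeyError, excluded by Pre_)
def pvGetType (c : List (String × String)) : Option String :=
  (c.find? (fun p => p.1 == "type")).map Prod.snd

-- ===== PORT A =====
def generate_conflict_recommendations_py (conflicts : List (List (String × String))) : List String :=
  -- conflict_types = defaultdict(list); for conflict in conflicts: conflict_types[conflict['type']].append(conflict)
  let conflict_types : PySem.Dict String (List (List (String × String))) :=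
    conflicts.foldl (fun d c => d.modify ((pvGetType c).getD "") [] (· ++ [c])) PySem.Dict.empty
  let recommendations : List String := []
  let recommendations := if conflict_types.getD "crew_conflict" [] ≠ [] then
    recommendations ++ ["Consider staggering crew assignments or adding contingency crew members"] else recommendations
  let recommendations := if conflict_types.getD "equipment_conflict" [] ≠ [] then
    recommendations ++ ["Review equipment availability and consider backup equipment options"] else recommendations
  let recommendations := if conflict_types.getD "location_conflict" [] ≠ [] then
    recommendations ++ ["Adjust event timing to avoid location overlaps or use alternative locations"] else recommendations
  let recommendations := if (conflicts.length : Int) > 5 then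
    recommendations ++ ["Consider extending the shooting day or splitting scenes across multiple days"] else recommendations
  recommendations

-- ===== PORT B =====
def generate_conflict_recommendations_py_alt (conflicts : List (List (String × String))) : List String :=
  let recommendations : List String := []
  let recommendations := if conflicts.any (fun c => (pvGetType c).getD "" == "crew_conflict") then
    recommendations ++ ["Consider staggering crew assignments or adding contingency crew members"] else recommendations
  let recommendations := if conflicts.any (fun c => (pvGetType c).getD "" == "equipment_conflict") then
    recommendations ++ ["Review equipment availability and consider backup equipment options"] else recommendations
  let recommendations := if conflicts.any (fun c => (pvGetType c).getD "" == "location_conflict") then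
    recommendations ++ ["Adjust event timing to avoid location overlaps or use alternative locations"] else recommendations
  let recommendations := if (conflicts.length : Int) > 5 then
    recommendations ++ ["Consider extending the shooting day or splitting scenes across multiple days"] else recommendations
  recommendations

-- ===== PRECONDITION & SPEC =====
-- Pre_ excludes exactly the inputs where some conflict dict lacks a "type" key: there A raises KeyError.
def Pre_generate_conflict_recommendations_py (conflicts : List (List (String × String))) : Prop :=
  conflicts.all (fun c => ((c.find? (fun p => p.1 == "type")).map Prod.snd).isSome) = true
instance (conflicts : List (List (String × String))) : Decidable (Pre_generate_conflict_recommendations_py conflicts) := by unfold Pre_generate_conflict_recommendations_py; infer_instance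
def pvWitness_generate_conflict_recommendations_py : (List (List (String × String))) := [[("type", "crew_conflict")], [("type", "other")]]
def Spec_generate_conflict_recommendations_py (conflicts : List (List (String × String))) (out : List String) : Prop := out = generate_conflict_recommendations_py_alt conflicts
instance (conflicts : List (List (String × String))) (out : List String) : Decidable (Spec_generate_conflict_recommendations_py conflicts out) := by unfold Spec_generate_conflict_recommendations_py; infer_instance

-- ===== CLAIM (what is proved, stated in full; the proofs are below) =====
def Claim_equal_generate_conflict_recommendations_py : Prop := ∀ (conflicts : List (List (String × String))), Dom_generate_conflict_recommendations_py conflicts → Pre_generate_conflict_recommendations_py conflicts → Spec_generate_conflict_recommendations_py conflicts (generate_conflict_recommendations_py conflicts)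

-- ===== LEMMAS AND PROOFS =====

-- the grouping fold's entry at t is the filter of conflicts whose type is t (on top of the start dict)
theorem pv_group_getD (conflicts : List (List (String × String)))
    (d : PySem.Dict String (List (List (String × String)))) (t : String) :
    (conflicts.foldl (fun d c => d.modify ((pvGetType c).getD "") [] (· ++ [c])) d).getD t []
      = d.getD t [] ++ conflicts.filter (fun c => (pvGetType c).getD "" == t) := by
  induction conflicts generalizing d with
  | nil => simp
  | cons c cs ih =>
    simp only [List.foldl_cons, List.filter_cons, ih]
    rw [PySem.Dict.getD_modify]
    by_cases h : t = (pvGetType c).getD ""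
    · simp [h]
    · have : ((pvGetType c).getD "" == t) = false := by
        simp [Ne.symm h]
      simp [h, this]

-- the grouped entry is nonempty iff some conflict has that type
theorem pv_group_ne_nil (conflicts : List (List (String × String))) (t : String) :
    ((conflicts.foldl (fun d c => d.modify ((pvGetType c).getD "") [] (· ++ [c]))
        PySem.Dict.empty).getD t [] ≠ [])
      ↔ conflicts.any (fun c => (pvGetType c).getD "" == t) = true := by
  rw [pv_group_getD]
  simp [List.any_eq_true, List.filter_eq_nil_iff]

-- ===== VERDICT (by name: the statement is the Claim_ definition above) =====
theorem generate_conflict_recommendations_py_spec : Claim_equal_generate_conflict_recommendations_py := by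
  intro conflicts _ _
  unfold Spec_generate_conflict_recommendations_py
  unfold generate_conflict_recommendations_py generate_conflict_recommendations_py_alt
  simp only [pv_group_ne_nil]
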